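-- pv_equiv track=rewrite | github.com/cathackk/advent-of-code | y2024/day19_towels.py | decompose_design_all
-- ===== SOURCE A (Python) =====
-- from typing import Iterable, Iterator, Sequence, TypeAlias
--
-- Pattern: TypeAlias = str
--
-- Patterns = Sequence[Pattern]
--
-- Design: TypeAlias = str
--
-- def decompose_design_all(design: Design, patterns: Patterns) -> Iterable[list[Pattern]]:
--     if not design:
--         yield []
--         return
--
--     yield from (
--         [pat] + subsol
--         for pat in patterns
--         if design.startswith(pat)
--         for subsol in decompose_design_all(design.removeprefix(pat), patterns)
--     )
-- ===== SOURCE B (Python) =====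
-- def decompose_design_all(design, patterns):
--     # Bottom-up DP over suffix positions: dp[i] = all decompositions of design[i:].
--     n = len(design)
--     dp = [None] * n + [[[]]]
--     for i in range(n - 1, -1, -1):
--         dp[i] = [
--             [p] + sub
--             for p in patterns
--             if design.startswith(p, i)
--             for sub in dp[i + len(p)]
--         ]
--     yield from dp[0]
-- ===== Notes on version B (the rewrite author's own statement) =====
-- stated objective: alternative
-- what changed: Replaces the top-down recursive generator with a bottom-up DP that fills a table dp[i] of all decompositions of design[i:] from the end of the string, then yields dp[0].
import Mathlib
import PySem

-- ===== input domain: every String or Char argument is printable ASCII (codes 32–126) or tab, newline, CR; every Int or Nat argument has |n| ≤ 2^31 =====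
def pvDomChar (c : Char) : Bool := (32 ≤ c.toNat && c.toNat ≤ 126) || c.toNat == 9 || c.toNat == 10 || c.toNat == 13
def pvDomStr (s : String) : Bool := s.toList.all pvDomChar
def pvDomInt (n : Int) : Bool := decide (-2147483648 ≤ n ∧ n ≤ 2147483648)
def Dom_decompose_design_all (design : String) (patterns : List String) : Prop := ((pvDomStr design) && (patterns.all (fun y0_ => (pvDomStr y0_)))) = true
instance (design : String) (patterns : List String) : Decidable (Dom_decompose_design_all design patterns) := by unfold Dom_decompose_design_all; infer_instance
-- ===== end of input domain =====

-- B replaces A's top-down recursive generator by a bottom-up DP table over suffix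
-- positions (objective: alternative decomposition; return values proved equal on Pre_).

-- ===== PORT A =====
-- design.removeprefix(pat)
def pvRemovePrefix (s pat : List Char) : List Char :=
  if pat.isPrefixOf s then s.drop pat.length else s

-- fuel-bounded transliteration of A's recursion (fuel only makes it total;
-- |design| + 1 fuel suffices on every input Pre_ admits)
def decomposeA : Nat → List Char → List String → List (List String)
  | 0, _, _ => []
  | fuel + 1, design, patterns =>
    if design = [] then [[]]
    else
      patterns.flatMap (fun pat =>
        if pat.toList.isPrefixOf design then
          (decomposeA fuel (pvRemovePrefix design pat.toList) patterns).map
            (fun subsol => pat :: subsol)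
        else [])

def decompose_design_all (design : String) (patterns : List String) : List (List String) :=
  decomposeA (design.toList.length + 1) design.toList patterns

-- ===== PORT B =====
-- dpTable s patterns = [dp[i], dp[i+1], …, dp[n]] for the suffix s = design[i:];
-- built back-to-front exactly as B's loop 'for i in range(n-1, -1, -1)'.
def dpTable : List Char → List String → List (List (List String))
  | [], _ => [[[]]]
  | c :: rest, patterns =>
    let tail := dpTable rest patterns
    (patterns.flatMap (fun p =>
      if p.toList.isPrefixOf (c :: rest) then
        (tail.getD (p.toList.length - 1) []).map (fun sub => p :: sub)
      else [])) :: tail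

def decompose_design_all_alt (design : String) (patterns : List String) : List (List String) :=
  (dpTable design.toList patterns).headD []

-- ===== PRECONDITION & SPEC =====
-- Pre_ excludes the degenerate inputs with an empty pattern and a nonempty design,
-- on which Python A raises RecursionError (infinite recursion) and B raises TypeError.
def Pre_decompose_design_all (design : String) (patterns : List String) : Prop :=
  design.toList = [] ∨ "" ∉ patterns
instance (design : String) (patterns : List String) : Decidable (Pre_decompose_design_all design patterns) := by unfold Pre_decompose_design_all; infer_instance

def pvWitness_decompose_design_all : String × List String := ("abab", ["a", "b", "ab"])

def Spec_decompose_design_all (design : String) (patterns : List String) (out : List (List String)) : Prop := out = decompose_design_all_alt design patterns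
instance (design : String) (patterns : List String) (out : List (List String)) : Decidable (Spec_decompose_design_all design patterns out) := by unfold Spec_decompose_design_all; infer_instance

-- ===== CLAIM (what is proved, stated in full; the proofs are below) =====
def Claim_equal_decompose_design_all : Prop := ∀ (design : String) (patterns : List String), Dom_decompose_design_all design patterns → Pre_decompose_design_all design patterns → Spec_decompose_design_all design patterns (decompose_design_all design patterns)

-- ===== LEMMAS AND PROOFS =====

theorem dpTable_getD (s : List Char) (patterns : List String) (k : Nat) (hk : k ≤ s.length) :
    (dpTable s patterns).getD k [] = (dpTable (s.drop k) patterns).headD [] := by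
  induction s generalizing k with
  | nil =>
    have : k = 0 := Nat.le_zero.mp hk
    subst this
    simp [dpTable]
  | cons c rest ih =>
    cases k with
    | zero => simp [dpTable]
    | succ k =>
      have hk' : k ≤ rest.length := by simpa using hk
      simpa [dpTable] using ih k hk'

theorem prefix_length_le {p s : List Char} (h : p.isPrefixOf s = true) :
    p.length ≤ s.length := by
  exact List.IsPrefix.length_le (List.isPrefixOf_iff_prefix.mp h)

theorem decomposeA_eq_dp (fuel : Nat) :
    ∀ (s : List Char) (patterns : List String), "" ∉ patterns → s.length + 1 ≤ fuel →
      decomposeA fuel s patterns = (dpTable s patterns).headD [] := by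
  induction fuel with
  | zero => intro s patterns _ h; omega
  | succ fuel ih =>
    intro s patterns hne hlen
    cases s with
    | nil => simp [decomposeA, dpTable]
    | cons c rest =>
      simp only [decomposeA, dpTable, reduceCtorEq, if_false, List.headD_cons]
      -- pointwise over patterns, using membership to know p ≠ ""
      have : ∀ ps : List String, (∀ p ∈ ps, p ∈ patterns) →
          ps.flatMap (fun pat =>
            if pat.toList.isPrefixOf (c :: rest) then
              (decomposeA fuel (pvRemovePrefix (c :: rest) pat.toList) patterns).map
                (fun subsol => pat :: subsol)
            else []) =
          ps.flatMap (fun p =>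
            if p.toList.isPrefixOf (c :: rest) then
              ((dpTable rest patterns).getD (p.toList.length - 1) []).map (fun sub => p :: sub)
            else []) := by
        intro ps hps
        induction ps with
        | nil => rfl
        | cons p ps ihp =>
          have hpmem : p ∈ patterns := hps p (by simp)
          have hrest := ihp (fun q hq => hps q (by simp [hq]))
          simp only [List.flatMap_cons, hrest]
          congr 1
          by_cases hpre : p.toList.isPrefixOf (c :: rest) = true
          · have hp0 : p.toList ≠ [] := by
              intro h0
              exact hne ((String.toList_eq_nil_iff.mp h0) ▸ hpmem)
            have hlp : 1 ≤ p.toList.length := by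
              cases hpl : p.toList with
              | nil => exact absurd hpl hp0
              | cons a l => simp
            have hle : p.toList.length ≤ rest.length + 1 := by
              simpa using prefix_length_le hpre
            have hdrop : (c :: rest).drop p.toList.length = rest.drop (p.toList.length - 1) := by
              cases hpl : p.toList with
              | nil => exact absurd hpl hp0
              | cons a l => simp
            have hlen' : rest.length + 1 ≤ fuel := by
              simp only [List.length_cons] at hlen
              omega
            have hklen : (rest.drop (p.toList.length - 1)).length + 1 ≤ fuel := by
              have h1 : (rest.drop (p.toList.length - 1)).length
                  = rest.length - (p.toList.length - 1) := List.length_drop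
              omega
            rw [if_pos hpre, if_pos hpre]
            rw [pvRemovePrefix, if_pos hpre, hdrop,
              ih _ patterns hne hklen,
              dpTable_getD rest patterns (p.toList.length - 1) (by omega)]
          · rw [if_neg hpre, if_neg hpre]
      exact this patterns (fun _ h => h)

-- ===== VERDICT (by name: the statement is the Claim_ definition above) =====
theorem decompose_design_all_spec : Claim_equal_decompose_design_all := by
  intro design patterns _ hpre
  unfold Spec_decompose_design_all decompose_design_all decompose_design_all_alt
  rcases hpre with h | h
  · simp [h, decomposeA, dpTable]
  · exact decomposeA_eq_dp _ design.toList patterns h (by omega)
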